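-- pv_equiv track=rewrite | github.com/ealtenau/SWORD | scripts/merge_wse_drop_with_duckdb.py | group_relevant_columns
-- ===== SOURCE A (Python) =====
-- from typing import Dict, List, Optional, Tuple, Set
--
-- def group_relevant_columns(columns: List[str]) -> Dict[str, List[str]]:
--     """Heuristically group relevant variables by substring patterns."""
--     patterns = {
--         'ids': ['id', 'reach', 'node', 'continent', 'cl_ids'],
--         'geometry': ['x', 'y', 'lon', 'lat', 'geom'],
--         'hydraulics': ['wse', 'width', 'depth', 'slope', 'vel', 'q', 'area', 'stage'],
--         'topology': ['order', 'up', 'dn', 'trib', 'junction', 'main', 'side'],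
--         'quality': ['flag', 'qa', 'qc', 'valid', 'conf'],
--         'time': ['time', 'date', 'epoch']
--     }
--     lowered_to_orig = {c.lower(): c for c in columns}
--     grouped: Dict[str, List[str]] = {k: [] for k in patterns}
--     for key, subs in patterns.items():
--         for c in columns:
--             cl = c.lower()
--             if any(sub in cl for sub in subs):
--                 grouped[key].append(lowered_to_orig[cl])
--     # Deduplicate within groups while preserving order
--     for k, vals in grouped.items():
--         seen = set()
--         deduped: List[str] = []
--         for v in vals:
--             if v not in seen:
--                 seen.add(v)
--                 deduped.append(v)
--         grouped[k] = deduped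
--     return grouped
-- ===== SOURCE B (Python) =====
-- from typing import Dict, List
--
-- def group_relevant_columns(columns: List[str]) -> Dict[str, List[str]]:
--     """Canonicalize and dedupe the columns once, then each group is a plain filter."""
--     patterns = {
--         'ids': ['id', 'reach', 'node', 'continent', 'cl_ids'],
--         'geometry': ['x', 'y', 'lon', 'lat', 'geom'],
--         'hydraulics': ['wse', 'width', 'depth', 'slope', 'vel', 'q', 'area', 'stage'],
--         'topology': ['order', 'up', 'dn', 'trib', 'junction', 'main', 'side'],
--         'quality': ['flag', 'qa', 'qc', 'valid', 'conf'],
--         'time': ['time', 'date', 'epoch']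
--     }
--     last = {}
--     for c in columns:
--         last[c.lower()] = c
--     # distinct lowercase names in first-occurrence order, each mapped to its canonical original
--     canon = [last[cl] for cl in dict.fromkeys(c.lower() for c in columns)]
--     return {key: [v for v in canon if any(sub in v.lower() for sub in subs)]
--             for key, subs in patterns.items()}
-- ===== Notes on version B (the rewrite author's own statement) =====
-- stated objective: simpler
-- what changed: Instead of A's category-outer grouping loops followed by a per-group seen-set deduplication pass, B canonicalizes and deduplicates the column list once (dict.fromkeys on lowercase names mapped through the last-wins table) and then produces each group as a plain filter over that canonical list, so no per-group dedup state exists at all.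
import Mathlib
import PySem

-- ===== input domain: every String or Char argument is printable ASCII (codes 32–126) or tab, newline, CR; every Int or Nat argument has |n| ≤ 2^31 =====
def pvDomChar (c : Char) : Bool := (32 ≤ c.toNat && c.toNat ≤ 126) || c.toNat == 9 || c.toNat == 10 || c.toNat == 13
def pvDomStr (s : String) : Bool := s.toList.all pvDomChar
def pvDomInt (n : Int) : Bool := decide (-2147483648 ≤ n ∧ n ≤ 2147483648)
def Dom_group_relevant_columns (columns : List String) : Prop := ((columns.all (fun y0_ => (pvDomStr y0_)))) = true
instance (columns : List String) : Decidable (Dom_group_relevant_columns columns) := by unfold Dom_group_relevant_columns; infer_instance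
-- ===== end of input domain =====

-- B replaces A's category-outer grouping loops plus per-group dedup pass by one canonical
-- deduplication of the column list followed by a plain filter per category (objective: simpler).

-- shared literal: the patterns table both Pythons spell out, and the 'any(sub in cl ...)' test
def pvPatterns : List (String × List String) := [
  ("ids", ["id","reach","node","continent","cl_ids"]),
  ("geometry", ["x","y","lon","lat","geom"]),
  ("hydraulics", ["wse","width","depth","slope","vel","q","area","stage"]),
  ("topology", ["order","up","dn","trib","junction","main","side"]),
  ("quality", ["flag","qa","qc","valid","conf"]),
  ("time", ["time","date","epoch"])]

def pvMatch (subs : List String) (cl : String) : Bool := subs.any (fun sub => PySem.Str.isIn sub cl)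

-- ===== PORT A =====
-- 'lowered_to_orig[cl]' is ported as getD with default c: the key cl = c.lower() is always
-- present (it was inserted for c itself), so Python's lookup never raises and the default is dead.
def group_relevant_columns (columns : List String) : List (String × List String) :=
  let lowered_to_orig : PySem.Dict String String :=
    columns.foldl (fun d c => d.insert (PySem.Str.lower c) c) PySem.Dict.empty
  let grouped : PySem.Dict String (List String) :=
    pvPatterns.foldl (fun g kv => g.insert kv.1 ([] : List String)) PySem.Dict.empty
  let grouped := pvPatterns.foldl (fun g kv =>
      columns.foldl (fun g c =>
        let cl := PySem.Str.lower c
        if pvMatch kv.2 cl then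
          g.modify kv.1 [] (fun vs => vs ++ [lowered_to_orig.getD cl c])
        else g) g) grouped
  let grouped := grouped.items.foldl (fun g kv =>
      let st := kv.2.foldl (fun (st : PySem.Set String × List String) v =>
          if PySem.Set.contains st.1 v then st
          else (PySem.Set.add st.1 v, st.2 ++ [v])) (PySem.Set.empty, [])
      g.insert kv.1 st.2) grouped
  grouped.items

-- ===== PORT B =====
-- 'last[cl]' is ported as getD with dead default "": the key cl always came from the same
-- comprehension over columns, so it is present and Python's lookup never raises.
def group_relevant_columns_alt (columns : List String) : List (String × List String) :=
  let last : PySem.Dict String String :=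
    columns.foldl (fun d c => d.insert (PySem.Str.lower c) c) PySem.Dict.empty
  let canon : List String :=
    (PySem.List.dedup (columns.map (fun c => PySem.Str.lower c))).map
      (fun cl => last.getD cl "")
  (pvPatterns.foldl (fun d kv =>
      d.insert kv.1 (canon.filter (fun v => pvMatch kv.2 (PySem.Str.lower v))))
    PySem.Dict.empty).items

-- ===== PRECONDITION & SPEC =====
def Spec_group_relevant_columns (columns : List String) (out : List (String × List String)) : Prop := out = group_relevant_columns_alt columns
instance (columns : List String) (out : List (String × List String)) : Decidable (Spec_group_relevant_columns columns out) := by unfold Spec_group_relevant_columns; infer_instance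

-- ===== CLAIM (what is proved, stated in full; the proofs are below) =====
def Claim_equal_group_relevant_columns : Prop := ∀ (columns : List String), Dom_group_relevant_columns columns → Spec_group_relevant_columns columns (group_relevant_columns columns)

-- ===== LEMMAS AND PROOFS =====

-- proof-side abbreviations for the subterms of the two ports
def pvTest (subs : List String) (c : String) : Bool := pvMatch subs (PySem.Str.lower c)
def pvLow (columns : List String) : PySem.Dict String String :=
  columns.foldl (fun d c => d.insert (PySem.Str.lower c) c) PySem.Dict.empty
def pvOrig (columns : List String) (c : String) : String := (pvLow columns).getD (PySem.Str.lower c) c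
def pvRaw (columns subs : List String) : List String := (columns.filter (pvTest subs)).map (pvOrig columns)
def pvSpecVal (columns subs : List String) : List String := PySem.Set.ofList (pvRaw columns subs)
def pvOut (columns : List String) : List (String × List String) :=
  pvPatterns.map (fun kv => (kv.1, pvSpecVal columns kv.2))
def pvKeys : List String := pvPatterns.map Prod.fst
def pvG0 : PySem.Dict String (List String) :=
  pvPatterns.foldl (fun g kv => g.insert kv.1 ([] : List String)) PySem.Dict.empty

def pvAInner (columns : List String) (kv : String × List String)
    (g : PySem.Dict String (List String)) : PySem.Dict String (List String) :=
  columns.foldl (fun g c =>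
    if pvMatch kv.2 (PySem.Str.lower c) then
      g.modify kv.1 [] (fun vs => vs ++ [(pvLow columns).getD (PySem.Str.lower c) c])
    else g) g

def pvDedup (l : List String) : PySem.Set String × List String :=
  l.foldl (fun st v =>
    if PySem.Set.contains st.1 v then st
    else (PySem.Set.add st.1 v, st.2 ++ [v])) (PySem.Set.empty, [])

theorem shapeA (columns : List String) :
    group_relevant_columns columns =
      ((pvPatterns.foldl (fun g kv => pvAInner columns kv g) pvG0).items.foldl
        (fun g kv => g.insert kv.1 (pvDedup kv.2).2)
        (pvPatterns.foldl (fun g kv => pvAInner columns kv g) pvG0)).items := rfl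

theorem shapeB (columns : List String) :
    group_relevant_columns_alt columns =
      (pvPatterns.foldl (fun d kv =>
        d.insert kv.1 (((PySem.List.dedup (columns.map (fun c => PySem.Str.lower c))).map
            (fun cl => (pvLow columns).getD cl "")).filter
          (fun v => pvMatch kv.2 (PySem.Str.lower v)))) PySem.Dict.empty).items := rfl

theorem keys_insert_mem {ν : Type} (d : PySem.Dict String ν) {k : String} (v : ν)
    (h : k ∈ d.keys) : (d.insert k v).keys = d.keys :=
  PySem.Dict.keys_insert_of_contains d v ((PySem.Dict.contains_iff_mem_keys d k).mpr h)

theorem AInner_getD (columns : List String) (kv : String × List String) :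
    ∀ (cols : List String) (g : PySem.Dict String (List String)) (k' : String),
      (cols.foldl (fun g c =>
        if pvMatch kv.2 (PySem.Str.lower c) then
          g.modify kv.1 [] (fun vs => vs ++ [(pvLow columns).getD (PySem.Str.lower c) c])
        else g) g).getD k' []
      = if k' = kv.1 then g.getD k' [] ++ (cols.filter (pvTest kv.2)).map (pvOrig columns)
        else g.getD k' [] := by
  intro cols
  induction cols with
  | nil => intro g k'; simp
  | cons c t ih =>
    intro g k'
    by_cases h : pvMatch kv.2 (PySem.Str.lower c)
    · simp only [List.foldl_cons, h, if_true, List.filter_cons, pvTest]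
      rw [ih, PySem.Dict.getD_modify]
      split_ifs with h1
      · subst h1; simp [pvOrig]
      · rfl
    · simp only [List.foldl_cons, h, List.filter_cons, pvTest]
      rw [ih]
      simp

theorem AInner_keys (columns : List String) (kv : String × List String) :
    ∀ (cols : List String) (g : PySem.Dict String (List String)), kv.1 ∈ g.keys →
      (cols.foldl (fun g c =>
        if pvMatch kv.2 (PySem.Str.lower c) then
          g.modify kv.1 [] (fun vs => vs ++ [(pvLow columns).getD (PySem.Str.lower c) c])
        else g) g).keys = g.keys := by
  intro cols
  induction cols with
  | nil => intro g _; rfl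
  | cons c t ih =>
    intro g hg
    by_cases h : pvMatch kv.2 (PySem.Str.lower c)
    · simp only [List.foldl_cons, h, if_true]
      have hk : (g.modify kv.1 [] (fun vs => vs ++ [(pvLow columns).getD (PySem.Str.lower c) c])).keys = g.keys := by
        rw [PySem.Dict.keys_modify, keys_insert_mem _ _ hg]
      rw [ih _ (by rw [hk]; exact hg), hk]
    · simp only [List.foldl_cons, h]
      exact ih g hg

theorem AInner_getD' (columns : List String) (kv : String × List String)
    (g : PySem.Dict String (List String)) (k' : String) :
    (pvAInner columns kv g).getD k' []
      = if k' = kv.1 then g.getD k' [] ++ pvRaw columns kv.2 else g.getD k' [] :=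
  AInner_getD columns kv columns g k'

theorem AOuter_getD_out (columns : List String) :
    ∀ (pats : List (String × List String)) (g : PySem.Dict String (List String)) (k : String),
      k ∉ pats.map Prod.fst →
      (pats.foldl (fun g kv => pvAInner columns kv g) g).getD k [] = g.getD k [] := by
  intro pats
  induction pats with
  | nil => intro g k _; rfl
  | cons kv t ih =>
    intro g k hk
    simp only [List.map_cons, List.mem_cons, not_or] at hk
    simp only [List.foldl_cons]
    rw [ih _ _ hk.2, AInner_getD', if_neg hk.1]

theorem AOuter_getD (columns : List String) :
    ∀ (pats : List (String × List String)) (g : PySem.Dict String (List String))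
      (k : String) (subs : List String),
      (pats.map Prod.fst).Nodup → (k, subs) ∈ pats →
      (pats.foldl (fun g kv => pvAInner columns kv g) g).getD k [] = g.getD k [] ++ pvRaw columns subs := by
  intro pats
  induction pats with
  | nil => intro g k subs _ h; cases h
  | cons kv t ih =>
    intro g k subs hnd hmem
    simp only [List.map_cons, List.nodup_cons] at hnd
    simp only [List.foldl_cons]
    rcases List.mem_cons.mp hmem with h | h
    · have hk : k = kv.1 := by rw [← h]
      have hnot : k ∉ t.map Prod.fst := by rw [hk]; exact hnd.1
      rw [AOuter_getD_out columns t _ _ hnot, AInner_getD', if_pos hk, ← h]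
    · have hk : k ≠ kv.1 := by
        intro he
        exact hnd.1 (he ▸ (List.mem_map.mpr ⟨(k, subs), h, rfl⟩))
      rw [ih _ _ _ hnd.2 h, AInner_getD', if_neg hk]

theorem AOuter_keys (columns : List String) :
    ∀ (pats : List (String × List String)) (g : PySem.Dict String (List String)),
      (∀ kv ∈ pats, kv.1 ∈ g.keys) →
      (pats.foldl (fun g kv => pvAInner columns kv g) g).keys = g.keys := by
  intro pats
  induction pats with
  | nil => intro g _; rfl
  | cons kv t ih =>
    intro g hg
    simp only [List.foldl_cons]
    have h1 : (pvAInner columns kv g).keys = g.keys :=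
      AInner_keys columns kv columns g (hg kv (List.mem_cons_self))
    rw [ih _ (fun kv' h' => by rw [h1]; exact hg kv' (List.mem_cons_of_mem _ h')), h1]

theorem dedup_aux : ∀ (l : List String) (s : PySem.Set String),
    (l.foldl (fun st v =>
      if PySem.Set.contains st.1 v then st
      else (PySem.Set.add st.1 v, st.2 ++ [v])) (s, s))
    = (PySem.Set.update s l, PySem.Set.update s l) := by
  intro l
  induction l with
  | nil => intro s; rfl
  | cons v t ih =>
    intro s
    by_cases h : PySem.Set.contains s v
    · have hm : v ∈ s := by simpa [PySem.Set.contains] using h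
      simp only [List.foldl_cons, h, if_true]
      rw [ih]
      have ha : PySem.Set.add s v = s := by simp [PySem.Set.add, PySem.Set.contains, hm]
      simp [PySem.Set.update, List.foldl_cons, ha]
    · have hm : v ∉ s := by simpa [PySem.Set.contains] using h
      simp only [List.foldl_cons, h, Bool.false_eq_true, if_false]
      have ha : s ++ [v] = PySem.Set.add s v := by simp [PySem.Set.add, PySem.Set.contains, hm]
      rw [ha, ih]
      simp [PySem.Set.update, List.foldl_cons]

theorem pvDedup_eq (l : List String) :
    pvDedup l = (PySem.Set.ofList l, PySem.Set.ofList l) := by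
  have h := dedup_aux l PySem.Set.empty
  have h2 : PySem.Set.update PySem.Set.empty l = PySem.Set.ofList l := by
    rw [PySem.Set.ofList_eq_foldl]; rfl
  rw [h2] at h
  exact h

theorem pvG0_getD (k : String) : pvG0.getD k [] = [] := by
  simp [pvG0, pvPatterns, PySem.Dict.getD_insert, PySem.Dict.getD_empty]

theorem insert6_items (d : PySem.Dict String (List String)) (hk : d.keys = pvKeys)
    (v1 v2 v3 v4 v5 v6 : List String) :
    ((((((d.insert "ids" v1).insert "geometry" v2).insert "hydraulics" v3).insert "topology"
        v4).insert "quality" v5).insert "time" v6).items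
    = [("ids",v1),("geometry",v2),("hydraulics",v3),("topology",v4),("quality",v5),("time",v6)] := by
  have h1 : (d.insert "ids" v1).keys = pvKeys := by
    rw [keys_insert_mem _ _ (by rw [hk]; decide)]; exact hk
  have h2 : ((d.insert "ids" v1).insert "geometry" v2).keys = pvKeys := by
    rw [keys_insert_mem _ _ (by rw [h1]; decide)]; exact h1
  have h3 : (((d.insert "ids" v1).insert "geometry" v2).insert "hydraulics" v3).keys = pvKeys := by
    rw [keys_insert_mem _ _ (by rw [h2]; decide)]; exact h2
  have h4 : ((((d.insert "ids" v1).insert "geometry" v2).insert "hydraulics" v3).insert "topology" v4).keys = pvKeys := by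
    rw [keys_insert_mem _ _ (by rw [h3]; decide)]; exact h3
  have h5 : (((((d.insert "ids" v1).insert "geometry" v2).insert "hydraulics" v3).insert "topology" v4).insert "quality" v5).keys = pvKeys := by
    rw [keys_insert_mem _ _ (by rw [h4]; decide)]; exact h4
  have h6 : ((((((d.insert "ids" v1).insert "geometry" v2).insert "hydraulics" v3).insert "topology" v4).insert "quality" v5).insert "time" v6).keys = pvKeys := by
    rw [keys_insert_mem _ _ (by rw [h5]; decide)]; exact h5
  rw [PySem.Dict.items_eq_map_keys _ (by rw [h6]; decide) [], h6]
  simp [pvKeys, pvPatterns, PySem.Dict.getD_insert]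

theorem A_eq_out (columns : List String) : group_relevant_columns columns = pvOut columns := by
  rw [shapeA]
  set g1 := pvPatterns.foldl (fun g kv => pvAInner columns kv g) pvG0 with hg1
  have hkeys : g1.keys = pvKeys := by
    rw [hg1, AOuter_keys columns pvPatterns pvG0 (by decide)]; decide
  have hget : ∀ k subs, (k, subs) ∈ pvPatterns → g1.getD k [] = pvRaw columns subs := by
    intro k subs hm
    rw [hg1, AOuter_getD columns pvPatterns pvG0 k subs (by decide) hm, pvG0_getD]
    rfl
  have hitems : g1.items = [("ids", g1.getD "ids" []), ("geometry", g1.getD "geometry" []),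
      ("hydraulics", g1.getD "hydraulics" []), ("topology", g1.getD "topology" []),
      ("quality", g1.getD "quality" []), ("time", g1.getD "time" [])] := by
    rw [PySem.Dict.items_eq_map_keys g1 (by rw [hkeys]; decide) [], hkeys]
    rfl
  rw [hitems]
  simp only [List.foldl_cons, List.foldl_nil, pvDedup_eq]
  rw [hget "ids" ["id","reach","node","continent","cl_ids"] (by decide),
      hget "geometry" ["x","y","lon","lat","geom"] (by decide),
      hget "hydraulics" ["wse","width","depth","slope","vel","q","area","stage"] (by decide),
      hget "topology" ["order","up","dn","trib","junction","main","side"] (by decide),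
      hget "quality" ["flag","qa","qc","valid","conf"] (by decide),
      hget "time" ["time","date","epoch"] (by decide)]
  rw [insert6_items g1 hkeys]
  simp [pvOut, pvPatterns, pvSpecVal]

-- === B side ===

-- invariant of the lowered_to_orig / last dict: every stored value lowers back to its key,
-- and a present key's getD does not depend on the default
def pvGood (d : PySem.Dict String String) : Prop :=
  ∀ k x, d.contains k = true →
    PySem.Str.lower (d.getD k x) = k ∧ ∀ y, d.getD k x = d.getD k y

theorem good_foldl : ∀ (cols : List String) (d : PySem.Dict String String), pvGood d →
    pvGood (cols.foldl (fun d c => d.insert (PySem.Str.lower c) c) d) := by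
  intro cols
  induction cols with
  | nil => intro d h; exact h
  | cons c t ih =>
    intro d h
    simp only [List.foldl_cons]
    refine ih _ ?_
    intro k x hk
    rw [PySem.Dict.getD_insert]
    by_cases hke : k = PySem.Str.lower c
    · constructor
      · simp [hke]
      · intro y; simp [hke]
    · rw [if_neg hke]
      rw [PySem.Dict.contains_insert] at hk
      have hkc : (k == PySem.Str.lower c) = false := by
        simpa using hke
      rw [hkc, Bool.false_or] at hk
      refine ⟨(h k x hk).1, fun y => by
        rw [PySem.Dict.getD_insert, if_neg hke]; exact (h k x hk).2 y⟩

theorem good_pvLow (columns : List String) : pvGood (pvLow columns) := by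
  refine good_foldl columns PySem.Dict.empty ?_
  intro k x hk
  rw [PySem.Dict.contains_empty] at hk
  cases hk

theorem pvLow_keys (columns : List String) :
    (pvLow columns).keys = PySem.Set.ofList (columns.map (fun c => PySem.Str.lower c)) := by
  unfold pvLow
  rw [PySem.Dict.keys_foldl_insert_key (key := fun c => PySem.Str.lower c)]
  rw [PySem.Dict.keys_empty, PySem.Set.update_nil_left]

theorem pvLow_contains (columns : List String) (c : String) (h : c ∈ columns) :
    (pvLow columns).contains (PySem.Str.lower c) = true := by
  rw [PySem.Dict.contains_iff_mem_keys, pvLow_keys, PySem.Set.mem_ofList]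
  exact List.mem_map.mpr ⟨c, h, rfl⟩

theorem pvOrig_eq_getD (columns : List String) (c : String) (h : c ∈ columns) :
    pvOrig columns c = (pvLow columns).getD (PySem.Str.lower c) "" :=
  (good_pvLow columns (PySem.Str.lower c) c (pvLow_contains columns c h)).2 ""

-- a filter commutes with first-occurrence deduplication
theorem ofList_filter (f : String → Bool) :
    ∀ (L : List String), (PySem.Set.ofList L).filter f = PySem.Set.ofList (L.filter f) := by
  intro L
  induction L using List.reverseRecOn with
  | nil => rfl
  | append_singleton t x ih =>
    rw [PySem.Set.ofList_append_singleton, List.filter_append]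
    by_cases hx : x ∈ t
    · rw [show PySem.Set.add (PySem.Set.ofList t) x = PySem.Set.ofList t by
        simp [PySem.Set.add, hx]]
      rw [ih]
      by_cases hf : f x
      · have hfx : List.filter f [x] = [x] := by simp [hf]
        rw [hfx, PySem.Set.ofList_append_singleton]
        have hmf : x ∈ t.filter f := List.mem_filter.mpr ⟨hx, hf⟩
        simp [PySem.Set.add, hmf]
      · have hfx : List.filter f [x] = [] := by simp [hf]
        rw [hfx, List.append_nil]
    · rw [show PySem.Set.add (PySem.Set.ofList t) x = PySem.Set.ofList t ++ [x] by
        simp [PySem.Set.add, hx]]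
      rw [List.filter_append, ih]
      by_cases hf : f x
      · have hfx : List.filter f [x] = [x] := by simp [hf]
        have hmf : x ∉ t.filter f := fun hm => hx (List.mem_of_mem_filter hm)
        rw [hfx, PySem.Set.ofList_append_singleton]
        simp [PySem.Set.add, hmf]
      · have hfx : List.filter f [x] = [] := by simp [hf]
        rw [hfx, List.append_nil, List.append_nil]

-- a map by a function injective on the list commutes with first-occurrence deduplication
theorem ofList_map_inj (g : String → String) :
    ∀ (L : List String), (∀ a ∈ L, ∀ b ∈ L, g a = g b → a = b) →
      (PySem.Set.ofList L).map g = PySem.Set.ofList (L.map g) := by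
  intro L
  induction L using List.reverseRecOn with
  | nil => intro _; rfl
  | append_singleton t x ih =>
    intro hinj
    have hinj' : ∀ a ∈ t, ∀ b ∈ t, g a = g b → a = b := fun a ha b hb =>
      hinj a (List.mem_append_left _ ha) b (List.mem_append_left _ hb)
    rw [PySem.Set.ofList_append_singleton, List.map_append, List.map_singleton,
        PySem.Set.ofList_append_singleton, ← ih hinj']
    by_cases hx : x ∈ t
    · have hmg : g x ∈ (PySem.Set.ofList t).map g :=
        List.mem_map.mpr ⟨x, (PySem.Set.mem_ofList t x).mpr hx, rfl⟩
      simp [PySem.Set.add, hx, hmg]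
    · have hmg : g x ∉ (PySem.Set.ofList t).map g := by
        intro hcc
        obtain ⟨a, ha, hga⟩ := List.mem_map.mp hcc
        have ha' := (PySem.Set.mem_ofList t a).mp ha
        have : a = x := hinj a (List.mem_append_left _ ha') x
          (List.mem_append_right _ (List.mem_singleton.mpr rfl)) hga
        exact hx (this ▸ ha')
      simp [PySem.Set.add, hx, hmg]

theorem B_group (columns : List String) (subs : List String) :
    ((PySem.Set.ofList (columns.map (fun c => PySem.Str.lower c))).map
        (fun cl => (pvLow columns).getD cl "")).filter
      (fun v => pvMatch subs (PySem.Str.lower v))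
    = pvSpecVal columns subs := by
  have hmemlow : ∀ cl ∈ columns.map (fun c => PySem.Str.lower c),
      (pvLow columns).contains cl = true := by
    intro cl hcl
    obtain ⟨c, hc, rfl⟩ := List.mem_map.mp hcl
    exact pvLow_contains columns c hc
  have hlowval : ∀ cl ∈ columns.map (fun c => PySem.Str.lower c),
      PySem.Str.lower ((pvLow columns).getD cl "") = cl := fun cl hcl =>
    (good_pvLow columns cl "" (hmemlow cl hcl)).1
  -- push the filter through the map, then rewrite its predicate on members
  rw [List.filter_map]
  have hcong : (PySem.Set.ofList (columns.map (fun c => PySem.Str.lower c))).filter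
        ((fun v => pvMatch subs (PySem.Str.lower v)) ∘ (fun cl => (pvLow columns).getD cl ""))
      = (PySem.Set.ofList (columns.map (fun c => PySem.Str.lower c))).filter
        (fun cl => pvMatch subs cl) := by
    refine List.filter_congr ?_
    intro cl hcl
    have hcl' := (PySem.Set.mem_ofList _ cl).mp hcl
    simp only [Function.comp]
    rw [hlowval cl hcl']
  rw [hcong, ofList_filter]
  have hinj : ∀ a ∈ (columns.map (fun c => PySem.Str.lower c)).filter (fun cl => pvMatch subs cl),
      ∀ b ∈ (columns.map (fun c => PySem.Str.lower c)).filter (fun cl => pvMatch subs cl),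
      (pvLow columns).getD a "" = (pvLow columns).getD b "" → a = b := by
    intro a ha b hb hab
    have ha' := List.mem_of_mem_filter ha
    have hb' := List.mem_of_mem_filter hb
    have : PySem.Str.lower ((pvLow columns).getD a "")
        = PySem.Str.lower ((pvLow columns).getD b "") := by rw [hab]
    rwa [hlowval a ha', hlowval b hb'] at this
  rw [ofList_map_inj _ _ hinj]
  -- now identify the raw list with pvRaw
  unfold pvSpecVal pvRaw
  congr 1
  rw [List.filter_map]
  have : (columns.filter ((fun cl => pvMatch subs cl) ∘ (fun c => PySem.Str.lower c)))
      = columns.filter (pvTest subs) := rfl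
  rw [this, List.map_map]
  refine List.map_congr_left ?_
  intro c hc
  have hc' := List.mem_of_mem_filter hc
  simp only [Function.comp]
  exact (pvOrig_eq_getD columns c hc').symm

theorem B_eq_out (columns : List String) : group_relevant_columns_alt columns = pvOut columns := by
  rw [shapeB]
  simp only [PySem.List.dedup_eq_ofList]
  rw [PySem.Dict.items_foldl_insert_fresh pvPatterns Prod.fst
      (fun kv => (((PySem.Set.ofList (columns.map (fun c => PySem.Str.lower c))).map
          (fun cl => (pvLow columns).getD cl "")).filter
        (fun v => pvMatch kv.2 (PySem.Str.lower v))))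
      PySem.Dict.empty (fun kv _ => PySem.Dict.contains_empty _) (by decide)]
  have : (PySem.Dict.empty : PySem.Dict String (List String)).items = [] := rfl
  rw [this, List.nil_append]
  unfold pvOut
  refine List.map_congr_left ?_
  intro kv _
  rw [B_group columns kv.2]

-- ===== VERDICT (by name: the statement is the Claim_ definition above) =====
theorem group_relevant_columns_spec : Claim_equal_group_relevant_columns := by
  intro columns _
  unfold Spec_group_relevant_columns
  rw [A_eq_out, B_eq_out]
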